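-- pv_equiv track=rewrite | github.com/ahmetabdullahgultekin/Mizan | scripts/ingest_tanzil.py | _build_verse_manzil_map
-- ===== SOURCE A (Python) =====
-- MANZIL_RANGES = [
--     (1,  1,   1,   4, 176),
--     (2,  5,   1,   9, 129),
--     (3, 10,   1,  16, 128),
--     (4, 17,   1,  25,  77),
--     (5, 26,   1,  36,  83),
--     (6, 37,   1,  49,  18),
--     (7, 50,   1, 114,   6),
-- ]
--
-- def _build_verse_manzil_map(surah_verse_counts: dict[int, int]) -> dict[tuple[int, int], int]:
--     """For each (surah, verse), compute which Manzil it belongs to."""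
--     mapping: dict[tuple[int, int], int] = {}
--     for surah_num, verse_count in surah_verse_counts.items():
--         for verse_num in range(1, verse_count + 1):
--             manzil = 1
--             for (m, s_start, v_start, s_end, v_end) in MANZIL_RANGES:
--                 if (surah_num, verse_num) >= (s_start, v_start):
--                     manzil = m
--             mapping[(surah_num, verse_num)] = manzil
--     return mapping
-- ===== SOURCE B (Python) =====
-- _SURAH_STARTS = [1, 5, 10, 17, 26, 37, 50]  # first surah of each Manzil, ascending
--
--
-- def _bisect_right(a, x):
--     lo, hi = 0, len(a)
--     while lo < hi:
--         mid = (lo + hi) // 2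
--         if x < a[mid]:
--             hi = mid
--         else:
--             lo = mid + 1
--     return lo
--
--
-- def _build_verse_manzil_map(surah_verse_counts):
--     """For each (surah, verse), compute which Manzil it belongs to."""
--     return {
--         (surah_num, verse_num): max(_bisect_right(_SURAH_STARTS, surah_num), 1)
--         for surah_num, verse_count in surah_verse_counts.items()
--         for verse_num in range(1, verse_count + 1)
--     }
-- ===== Notes on version B (the rewrite author's own statement) =====
-- stated objective: alternative
-- what changed: Replaces the per-verse linear scan over MANZIL_RANGES (keeping the last matching range) by a binary search over the prebuilt ascending list of manzil start surahs, and builds the mapping with a single dict comprehension instead of nested mutating loops.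
import Mathlib
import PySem

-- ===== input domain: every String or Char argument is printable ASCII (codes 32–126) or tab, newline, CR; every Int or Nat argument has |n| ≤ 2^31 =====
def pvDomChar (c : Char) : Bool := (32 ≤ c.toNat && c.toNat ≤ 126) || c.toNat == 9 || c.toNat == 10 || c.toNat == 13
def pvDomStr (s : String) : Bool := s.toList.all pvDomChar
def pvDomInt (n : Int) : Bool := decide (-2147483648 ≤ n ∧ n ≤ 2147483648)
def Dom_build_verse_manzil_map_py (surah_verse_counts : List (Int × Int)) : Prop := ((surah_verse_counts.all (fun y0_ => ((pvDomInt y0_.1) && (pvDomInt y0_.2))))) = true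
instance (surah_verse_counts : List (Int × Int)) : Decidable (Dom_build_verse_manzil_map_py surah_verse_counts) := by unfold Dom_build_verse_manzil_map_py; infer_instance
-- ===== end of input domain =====

-- B replaces A's per-verse linear scan over MANZIL_RANGES by a binary search over the
-- ascending list of manzil start surahs, building the mapping as a single comprehension.

-- ===== PORT A =====
def MANZIL_RANGES : List (Int × Int × Int × Int × Int) :=
  [(1, 1, 1, 4, 176), (2, 5, 1, 9, 129), (3, 10, 1, 16, 128), (4, 17, 1, 25, 77),
   (5, 26, 1, 36, 83), (6, 37, 1, 49, 18), (7, 50, 1, 114, 6)]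

-- (surah_num, verse_num) >= (s_start, v_start): Python tuple comparison, lexicographic.
def build_verse_manzil_map_py (surah_verse_counts : List (Int × Int)) : List (Int × Int × Int) :=
  let mapping :=
    (PySem.Dict.ofList surah_verse_counts).items.foldl
      (fun (mapping : PySem.Dict (Int × Int) Int) sc =>
        (PySem.List.pyRange 1 (sc.2 + 1) 1).foldl
          (fun mapping v =>
            let manzil := MANZIL_RANGES.foldl
              (fun m r =>
                if r.2.1 < sc.1 ∨ (sc.1 = r.2.1 ∧ r.2.2.1 ≤ v) then r.1 else m) 1
            mapping.insert (sc.1, v) manzil)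
          mapping)
      PySem.Dict.empty
  mapping.items.map (fun kv => (kv.1.1, kv.1.2, kv.2))

-- ===== PORT B =====
def SURAH_STARTS : List Int := [1, 5, 10, 17, 26, 37, 50]

-- hand port of Source B's _bisect_right while-loop (exact: lo, hi stay in [0, len a], mid in range)
def pyBisectRight (a : List Int) (x : Int) (lo hi : Nat) : Nat :=
  if lo < hi then
    let mid := (lo + hi) / 2
    if x < a.getD mid 0 then pyBisectRight a x lo mid
    else pyBisectRight a x (mid + 1) hi
  else lo
termination_by hi - lo

-- the dict comprehension, built by inserting each (key, value) pair in iteration order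
def build_verse_manzil_map_py_alt (surah_verse_counts : List (Int × Int)) : List (Int × Int × Int) :=
  let mapping :=
    (PySem.Dict.ofList surah_verse_counts).items.foldl
      (fun (mapping : PySem.Dict (Int × Int) Int) sc =>
        (PySem.List.pyRange 1 (sc.2 + 1) 1).foldl
          (fun mapping v =>
            mapping.insert (sc.1, v)
              ((max (pyBisectRight SURAH_STARTS sc.1 0 SURAH_STARTS.length) 1 : Nat) : Int))
          mapping)
      PySem.Dict.empty
  mapping.items.map (fun kv => (kv.1.1, kv.1.2, kv.2))

-- ===== PRECONDITION & SPEC =====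
def Spec_build_verse_manzil_map_py (surah_verse_counts : List (Int × Int)) (out : List (Int × Int × Int)) : Prop := out = build_verse_manzil_map_py_alt surah_verse_counts
instance (surah_verse_counts : List (Int × Int)) (out : List (Int × Int × Int)) : Decidable (Spec_build_verse_manzil_map_py surah_verse_counts out) := by unfold Spec_build_verse_manzil_map_py; infer_instance

-- ===== CLAIM (what is proved, stated in full; the proofs are below) =====
def Claim_equal_build_verse_manzil_map_py : Prop := ∀ (surah_verse_counts : List (Int × Int)), Dom_build_verse_manzil_map_py surah_verse_counts → Spec_build_verse_manzil_map_py surah_verse_counts (build_verse_manzil_map_py surah_verse_counts)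

-- ===== LEMMAS AND PROOFS =====

-- the binary search on the 7-element start table, evaluated to a case split on the surah number
lemma bisect_eval (s : Int) :
    pyBisectRight SURAH_STARTS s 0 SURAH_STARTS.length =
      if s < 1 then 0 else if s < 5 then 1 else if s < 10 then 2 else if s < 17 then 3
      else if s < 26 then 4 else if s < 37 then 5 else if s < 50 then 6 else 7 := by
  simp only [SURAH_STARTS, List.length_cons, List.length_nil]
  rw [pyBisectRight.eq_def]
  norm_num [List.getD]
  split_ifs <;>
    (repeat (first
      | rfl
      | omega
      | (rw [pyBisectRight.eq_def]; norm_num [List.getD]; try split_ifs <;> try omega)))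

lemma scan_eval (s v : Int) (hv : 1 ≤ v) :
    MANZIL_RANGES.foldl
      (fun m r => if r.2.1 < s ∨ (s = r.2.1 ∧ r.2.2.1 ≤ v) then r.1 else m) 1 =
      if s < 1 then 1 else if s < 5 then 1 else if s < 10 then 2 else if s < 17 then 3
      else if s < 26 then 4 else if s < 37 then 5 else if s < 50 then 6 else 7 := by
  simp only [MANZIL_RANGES, List.foldl_cons, List.foldl_nil]
  rcases lt_or_ge s 1 with h|h
  · rw [if_neg (by omega), if_neg (by omega), if_neg (by omega), if_neg (by omega),
      if_neg (by omega), if_neg (by omega), if_neg (by omega), if_pos h]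
  rcases lt_or_ge s 5 with h2|h2
  · rw [if_neg (by omega), if_neg (by omega), if_neg (by omega), if_neg (by omega),
      if_neg (by omega), if_neg (by omega), if_pos (by omega), if_neg (by omega), if_pos h2]
  rcases lt_or_ge s 10 with h3|h3
  · rw [if_neg (by omega), if_neg (by omega), if_neg (by omega), if_neg (by omega),
      if_neg (by omega), if_pos (by omega), if_neg (by omega), if_neg (by omega), if_pos h3]
  rcases lt_or_ge s 17 with h4|h4
  · rw [if_neg (by omega), if_neg (by omega), if_neg (by omega), if_neg (by omega),
      if_pos (by omega), if_neg (by omega), if_neg (by omega), if_neg (by omega), if_pos h4]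
  rcases lt_or_ge s 26 with h5|h5
  · rw [if_neg (by omega), if_neg (by omega), if_neg (by omega), if_pos (by omega),
      if_neg (by omega), if_neg (by omega), if_neg (by omega), if_neg (by omega), if_pos h5]
  rcases lt_or_ge s 37 with h6|h6
  · rw [if_neg (by omega), if_neg (by omega), if_pos (by omega), if_neg (by omega),
      if_neg (by omega), if_neg (by omega), if_neg (by omega), if_neg (by omega), if_pos h6]
  rcases lt_or_ge s 50 with h7|h7
  · rw [if_neg (by omega), if_pos (by omega), if_neg (by omega), if_neg (by omega),
      if_neg (by omega), if_neg (by omega), if_neg (by omega), if_neg (by omega), if_pos h7]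
  · rw [if_pos (by omega), if_neg (by omega), if_neg (by omega), if_neg (by omega),
      if_neg (by omega), if_neg (by omega), if_neg (by omega), if_neg (by omega)]

lemma manzil_eq (s v : Int) (hv : 1 ≤ v) :
    MANZIL_RANGES.foldl
      (fun m r => if r.2.1 < s ∨ (s = r.2.1 ∧ r.2.2.1 ≤ v) then r.1 else m) 1 =
    ((max (pyBisectRight SURAH_STARTS s 0 SURAH_STARTS.length) 1 : Nat) : Int) := by
  rw [scan_eval s v hv, bisect_eval]
  split_ifs <;> rfl

-- ===== VERDICT (by name: the statement is the Claim_ definition above) =====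
theorem build_verse_manzil_map_py_spec : Claim_equal_build_verse_manzil_map_py := by
  intro svc _
  unfold Spec_build_verse_manzil_map_py build_verse_manzil_map_py build_verse_manzil_map_py_alt
  refine congrArg (List.map _) (congrArg PySem.Dict.items (PySem.List.foldl_congr_mem _ _ _ _ ?_))
  intro acc sc _
  refine PySem.List.foldl_congr_mem _ _ _ _ ?_
  intro acc' v hv
  rw [PySem.List.mem_pyRange_one] at hv
  rw [manzil_eq sc.1 v hv.1]
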